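-- pv_equiv track=rewrite | github.com/kamiderka/WDI-2024 | Zestaw 1 - Proste programy z pętlami/zad034.py | contains_its_length_digit
-- ===== SOURCE A (Python) =====
-- def contains_its_length_digit(n :int)->bool:
--     occur = [False]*10
--     i=0
--     while n > 0 and i < 9:
--         occur[n%10]=True
--         n//=10
--         i+=1
--     return occur[i] and not n
-- ===== SOURCE B (Python) =====
-- def contains_its_length_digit(n: int) -> bool:
--     if n <= 0:
--         return False
--     s = str(n)
--     L = len(s)
--     return L <= 9 and any(int(c) == L for c in s)
-- ===== Notes on version B (the rewrite author's own statement) =====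
-- stated objective: simpler
-- what changed: B computes the decimal length upfront from str(n) and scans the digit characters comparing each directly to the length, instead of A's discovering the length during a divmod loop that fills a 10-element boolean presence table and indexes it afterwards.
import Mathlib
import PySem

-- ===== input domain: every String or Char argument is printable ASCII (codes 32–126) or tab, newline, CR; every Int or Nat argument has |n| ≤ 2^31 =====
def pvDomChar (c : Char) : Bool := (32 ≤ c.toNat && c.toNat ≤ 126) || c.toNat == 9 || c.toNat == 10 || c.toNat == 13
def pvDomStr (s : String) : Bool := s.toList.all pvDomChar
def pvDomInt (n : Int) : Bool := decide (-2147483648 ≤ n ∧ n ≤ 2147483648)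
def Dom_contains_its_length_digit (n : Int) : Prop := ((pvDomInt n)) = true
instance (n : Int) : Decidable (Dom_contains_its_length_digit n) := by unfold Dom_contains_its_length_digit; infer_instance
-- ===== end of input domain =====

-- B computes the decimal length upfront from str(n) and compares each digit to it directly,
-- replacing A's divmod loop that fills a 10-slot presence table while discovering the length (objective: simpler).

-- ===== PORT A =====
-- while n > 0 and i < 9: occur[n%10] = True; n //= 10; i += 1
def pvALoop (occur : List Bool) (n : Int) (i : Nat) : List Bool × Int × Nat :=
  if h : 0 < n ∧ i < 9 then
    pvALoop (occur.set (PySem.Int.mod n 10).toNat true) (PySem.Int.floordiv n 10) (i + 1)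
  else (occur, n, i)
termination_by 9 - i
decreasing_by omega

def contains_its_length_digit (n : Int) : Bool :=
  let r := pvALoop (List.replicate 10 false) n 0
  -- occur[i] and not n  (i ≤ 9 always, so occur[i] never raises)
  r.1.getD r.2.2 false && (r.2.1 == 0)

-- ===== PORT B =====
def contains_its_length_digit_alt (n : Int) : Bool :=
  if n ≤ 0 then false
  else
    let s := PySem.Int.toChars n          -- str(n)
    let L := s.length                     -- len(s)
    -- int(c): every c is a decimal digit character of str(n), so ofChars? is always `some`
    decide (L ≤ 9) && s.any (fun c => (PySem.Int.ofChars? [c]).getD 0 == (L : Int))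

-- ===== PRECONDITION & SPEC =====
def Spec_contains_its_length_digit (n : Int) (out : Bool) : Prop := out = contains_its_length_digit_alt n
instance (n : Int) (out : Bool) : Decidable (Spec_contains_its_length_digit n out) := by unfold Spec_contains_its_length_digit; infer_instance

-- ===== CLAIM (what is proved, stated in full; the proofs are below) =====
def Claim_equal_contains_its_length_digit : Prop := ∀ (n : Int), Dom_contains_its_length_digit n → Spec_contains_its_length_digit n (contains_its_length_digit n)

-- ===== LEMMAS AND PROOFS =====

-- marking digits in the presence table, as A's loop does
def pvMark (ds : List Nat) (oc : List Bool) : List Bool :=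
  ds.foldl (fun o d => o.set d true) oc

theorem pvMark_getD (ds : List Nat) (oc : List Bool) (j : Nat) (hj : j < oc.length) :
    (pvMark ds oc).getD j false = (decide (j ∈ ds) || oc.getD j false) := by
  induction ds generalizing oc with
  | nil => simp [pvMark]
  | cons d ds ih =>
      have h1 : (pvMark (d :: ds) oc) = pvMark ds (oc.set d true) := rfl
      rw [h1, ih _ (by simpa using hj)]
      by_cases hdj : d = j
      · subst hdj
        simp [List.getD, hj]
      · simp [List.getD, hdj, eq_comm (a := j) (b := d)]

theorem pvALoop_spec (m : Nat) : ∀ (i : Nat) (occur : List Bool), i ≤ 9 →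
    pvALoop occur (m : Int) i =
      (pvMark ((Nat.digits 10 m).take (9 - i)) occur,
       ((m / 10 ^ min (Nat.digits 10 m).length (9 - i) : Nat) : Int),
       i + min (Nat.digits 10 m).length (9 - i)) := by
  induction m using Nat.strong_induction_on with
  | _ m ih =>
    intro i occur hi
    by_cases hm : m = 0
    · subst hm
      rw [pvALoop]
      simp [pvMark]
    · by_cases hi9 : i = 9
      · subst hi9
        rw [pvALoop]
        simp [pvMark]
      · have hm0 : 0 < m := Nat.pos_of_ne_zero hm
        have hstep : pvALoop occur (m : Int) i
            = pvALoop (occur.set ((PySem.Int.mod (m : Int) 10).toNat) true) (PySem.Int.floordiv (m : Int) 10) (i + 1) := by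
          rw [pvALoop]
          simp only [dif_pos (show 0 < (m : Int) ∧ i < 9 by constructor <;> [exact_mod_cast hm0; omega])]
        rw [hstep]
        have hmod : (PySem.Int.mod (m : Int) 10).toNat = m % 10 := by
          rw [show ((10 : Int)) = ((10 : Nat) : Int) by norm_num, PySem.Int.mod_natCast,
            Int.toNat_natCast]
        have hdiv : PySem.Int.floordiv (m : Int) 10 = ((m / 10 : Nat) : Int) := by
          rw [show ((10 : Int)) = ((10 : Nat) : Int) by norm_num, PySem.Int.floordiv_natCast]
        rw [hmod, hdiv, ih (m / 10) (Nat.div_lt_self hm0 (by norm_num)) (i + 1) _ (by omega)]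
        have hdig : Nat.digits 10 m = m % 10 :: Nat.digits 10 (m / 10) :=
          Nat.digits_def' (by norm_num) hm0
        rw [hdig]
        have h91 : 9 - i = (9 - (i + 1)) + 1 := by omega
        rw [h91]
        simp only [List.take_succ_cons, List.length_cons]
        have hmin : min ((Nat.digits 10 (m / 10)).length + 1) ((9 - (i + 1)) + 1)
            = min ((Nat.digits 10 (m / 10)).length) (9 - (i + 1)) + 1 := by omega
        rw [hmin]
        refine congrArg₂ _ rfl (congrArg₂ _ ?_ (by omega))
        rw [pow_succ', Nat.div_div_eq_div_mul]

-- str(n) for 0 < m is the decimal digits, i.e. Nat.digits reversed through digitChar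
theorem pvToDigitsCore_eq (m : Nat) : ∀ (f : Nat) (ds : List Char), 0 < m → m ≤ f →
    Nat.toDigitsCore 10 (f + 1) m ds = ((Nat.digits 10 m).map Nat.digitChar).reverse ++ ds := by
  induction m using Nat.strong_induction_on with
  | _ m ih =>
    intro f ds hm hf
    have hdig : Nat.digits 10 m = m % 10 :: Nat.digits 10 (m / 10) :=
      Nat.digits_def' (by norm_num) hm
    rw [Nat.toDigitsCore]
    by_cases h10 : m / 10 = 0
    · simp [h10, hdig]
    · have hm10 : 0 < m / 10 := Nat.pos_of_ne_zero h10
      have hlt : m / 10 < m := Nat.div_lt_self hm (by norm_num)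
      have hf1 : f = (f - 1) + 1 := by omega
      rw [if_neg h10, hf1, ih (m / 10) hlt (f - 1) _ hm10 (by omega), hdig]
      simp

theorem pvToChars_pos (m : Nat) (hm : 0 < m) :
    PySem.Int.toChars (m : Int) = ((Nat.digits 10 m).map Nat.digitChar).reverse := by
  have : ¬ ((m : Int) < 0) := by simp
  simp only [PySem.Int.toChars, if_neg this, Int.toNat_natCast]
  have := pvToDigitsCore_eq m m [] hm (le_refl m)
  simpa [Nat.toDigits] using this

theorem pvOfDigitChar (d : Nat) (hd : d < 10) :
    (PySem.Int.ofChars? [Nat.digitChar d]).getD 0 = (d : Int) := by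
  interval_cases d <;> decide

theorem contains_its_length_digit_spec_aux : ∀ (n : Int),
    contains_its_length_digit n = contains_its_length_digit_alt n := by
  intro n
  by_cases hn : n ≤ 0
  · unfold contains_its_length_digit contains_its_length_digit_alt
    rw [pvALoop, dif_neg (by omega : ¬ (0 < n ∧ 0 < 9))]
    simp [hn, List.getD]
  · rw [Int.not_le] at hn
    obtain ⟨m, rfl⟩ : ∃ m : Nat, n = (m : Int) := ⟨n.toNat, (Int.toNat_of_nonneg hn.le).symm⟩
    have hm : 0 < m := by exact_mod_cast hn
    set dl := Nat.digits 10 m with hdl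
    set L := dl.length with hL
    have hdlt : ∀ d ∈ dl, d < 10 := fun d hd => Nat.digits_lt_base (by norm_num) hd
    have hA0 : contains_its_length_digit (m : Int)
        = ((pvALoop (List.replicate 10 false) (m : Int) 0).1.getD
             (pvALoop (List.replicate 10 false) (m : Int) 0).2.2 false
           && ((pvALoop (List.replicate 10 false) (m : Int) 0).2.1 == 0)) := rfl
    have hB0 : contains_its_length_digit_alt (m : Int)
        = if (m : Int) ≤ 0 then false else
            (decide ((PySem.Int.toChars (m : Int)).length ≤ 9)
              && (PySem.Int.toChars (m : Int)).any
                   (fun c => (PySem.Int.ofChars? [c]).getD 0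
                     == (((PySem.Int.toChars (m : Int)).length : Nat) : Int))) := rfl
    have hlen : ((dl.map Nat.digitChar).reverse).length = L := by simp [hL]
    rw [hA0, pvALoop_spec m 0 _ (by omega), hB0, if_neg (by omega), pvToChars_pos m hm]
    simp only [← hdl, ← hL, Nat.sub_zero, Nat.zero_add, hlen]
    by_cases h9 : L ≤ 9
    · have hmin : min L 9 = L := by omega
      have htk : dl.take 9 = dl := List.take_of_length_le (by omega)
      have hdiv0 : m / 10 ^ L = 0 := by
        apply Nat.div_eq_of_lt
        exact (Nat.digits_length_le_iff (by norm_num) m).mp (le_of_eq hL.symm)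
      have hrep : (List.replicate 10 false).getD L false = false := by
        rw [List.getD_eq_getElem?_getD, List.getElem?_replicate, if_pos (by omega : L < 10)]
        rfl
      have hget : (pvMark dl (List.replicate 10 false)).getD L false = decide (L ∈ dl) := by
        rw [pvMark_getD dl _ L (by simp; omega), hrep, Bool.or_false]
      have hany : ((dl.map Nat.digitChar).reverse).any
          (fun c => (PySem.Int.ofChars? [c]).getD 0 == (L : Int)) = decide (L ∈ dl) := by
        rw [List.any_reverse, List.any_map]
        rcases h : decide (L ∈ dl) with _ | _
        · simp only [decide_eq_false_iff_not] at h
          simp only [List.any_eq_false]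
          intro d hd
          have hne : d ≠ L := fun hEq => h (hEq ▸ hd)
          simp [Function.comp_apply, pvOfDigitChar d (hdlt d hd), hne]
        · simp only [decide_eq_true_eq] at h
          simp only [List.any_eq_true]
          exact ⟨L, h, by simp [Function.comp_apply, pvOfDigitChar L (hdlt L h)]⟩
      rw [hmin, htk, hdiv0, hget, hany, decide_eq_true h9]
      simp only [Nat.cast_zero, beq_self_eq_true, Bool.and_true, Bool.true_and]
    · have hmin : min L 9 = 9 := by omega
      have hdiv : m / 10 ^ 9 ≠ 0 := by
        intro h0
        have hlt : m < 10 ^ 9 := Nat.lt_of_div_eq_zero (by positivity) h0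
        have h' : L ≤ 9 := by
          rw [hL, hdl]; exact (Nat.digits_length_le_iff (by norm_num) m).mpr hlt
        exact h9 h'
      have h2 : ((( m / 10 ^ 9 : Nat) : Int) == 0) = false := by
        rw [beq_eq_false_iff_ne]
        exact Int.natCast_ne_zero.mpr hdiv
      rw [hmin, h2, Bool.and_false, decide_eq_false h9, Bool.false_and]

-- ===== VERDICT (by name: the statement is the Claim_ definition above) =====
theorem contains_its_length_digit_spec : Claim_equal_contains_its_length_digit := by
  intro n _
  exact contains_its_length_digit_spec_aux n
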